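-- pv_equiv track=rewrite | github.com/AndreiMateescu/PythonProjects | Python Projects/Python/functii.py | comparare
-- ===== SOURCE A (Python) =====
-- def comparare(matrice1, matrice2, n):
--     for i in range(n):
--         for j in range(n):
--             if matrice1[j][2] < matrice2[j][2]:
--                 return -1
--             elif matrice1[j][2] > matrice2[j][2]:
--                 return 1
--     return 0
-- ===== SOURCE B (Python) =====
-- def comparare(matrice1, matrice2, n):
--     k = max(n, 0)
--     pairs = zip(matrice1[:k], matrice2[:k])
--     return next((-1 if a[2] < b[2] else 1 for a, b in pairs if a[2] != b[2]), 0)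
-- ===== Notes on version B (the rewrite author's own statement) =====
-- stated objective: simpler
-- what changed: Replaces the redundant quadratic double loop with index arithmetic by a single lazy pass over the zipped third columns of the two row prefixes, returning the sign of the first differing pair via next() with default 0.
import Mathlib
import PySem

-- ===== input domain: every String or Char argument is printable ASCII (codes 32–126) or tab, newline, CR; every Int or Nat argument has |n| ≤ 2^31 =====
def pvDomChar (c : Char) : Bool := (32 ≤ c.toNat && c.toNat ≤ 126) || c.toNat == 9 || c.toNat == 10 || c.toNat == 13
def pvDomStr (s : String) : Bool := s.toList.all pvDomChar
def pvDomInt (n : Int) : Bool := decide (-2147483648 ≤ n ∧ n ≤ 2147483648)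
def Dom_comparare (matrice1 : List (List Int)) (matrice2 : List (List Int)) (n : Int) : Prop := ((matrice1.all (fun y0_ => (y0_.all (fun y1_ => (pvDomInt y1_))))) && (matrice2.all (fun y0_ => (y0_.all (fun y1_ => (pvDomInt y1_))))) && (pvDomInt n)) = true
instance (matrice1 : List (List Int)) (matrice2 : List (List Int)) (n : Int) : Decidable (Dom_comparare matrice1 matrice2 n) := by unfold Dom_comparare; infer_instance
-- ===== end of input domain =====

-- B replaces A's redundant quadratic double loop by one lazy pass over the zipped
-- third columns of the two n-row prefixes (objective: simpler).

-- ===== PORT A =====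
-- matrice[j][2] (j ≥ 0 throughout A); within Pre_ every index reached is in range,
-- so the getD defaults are never used on inputs the claim covers.
def pvCol (m : List (List Int)) (j : Nat) : Int := (m.getD j []).getD 2 0

-- the inner 'for j in range(n)' with its early returns (loop = structural recursion on
-- the remaining iteration count; some v = "returned v", none = "fell through")
def pvInner (m1 m2 : List (List Int)) : Nat → Nat → Option Int
  | _, 0 => none
  | j, fuel+1 =>
    if pvCol m1 j < pvCol m2 j then some (-1)
    else if pvCol m1 j > pvCol m2 j then some 1
    else pvInner m1 m2 (j+1) fuel

-- the outer 'for i in range(n)' (its body does not use i)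
def pvOuter (m1 m2 : List (List Int)) (k : Nat) : Nat → Option Int
  | 0 => none
  | fuel+1 =>
    match pvInner m1 m2 0 k with
    | some v => some v
    | none => pvOuter m1 m2 k fuel

def comparare (matrice1 : List (List Int)) (matrice2 : List (List Int)) (n : Int) : Int :=
  (pvOuter matrice1 matrice2 n.toNat n.toNat).getD 0

-- ===== PORT B =====
-- a[2]; within Pre_ the default is never used on a pair the scan inspects before its answer
def pvCol2B (r : List Int) : Int := PySem.List.pyGetD r 2 0

def comparare_alt (matrice1 : List (List Int)) (matrice2 : List (List Int)) (n : Int) : Int :=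
  let k : Int := max n 0
  let pairs := (PySem.List.slice matrice1 none (some k)).zip (PySem.List.slice matrice2 none (some k))
  match pairs.find? (fun p => pvCol2B p.1 != pvCol2B p.2) with
  | some p => if pvCol2B p.1 < pvCol2B p.2 then -1 else 1
  | none => 0

-- ===== PRECONDITION & SPEC =====
def pvGood (m1 m2 : List (List Int)) (j : Nat) : Prop :=
  3 ≤ (m1.getD j []).length ∧ 3 ≤ (m2.getD j []).length

-- Pre_ excludes exactly the inputs on which Python A raises an IndexError (a row index or
-- the column index 2 goes out of range before the scan reaches its early return): A returns
-- iff n ≤ 0, or some j < n is reached with both rows present, ≥ 3 wide and differing in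
-- column 2 while all earlier rows are present, ≥ 3 wide and equal there, or all n rows of
-- both matrices are present and ≥ 3 wide.
def Pre_comparare (matrice1 : List (List Int)) (matrice2 : List (List Int)) (n : Int) : Prop :=
  n ≤ 0
  ∨ (∃ j < matrice1.length, (j : Int) < n ∧
       (∀ i < j, pvGood matrice1 matrice2 i ∧ pvCol matrice1 i = pvCol matrice2 i) ∧
       pvGood matrice1 matrice2 j ∧ pvCol matrice1 j ≠ pvCol matrice2 j)
  ∨ (n ≤ (matrice1.length : Int) ∧ n ≤ (matrice2.length : Int) ∧
       ∀ j < n.toNat, pvGood matrice1 matrice2 j)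
instance (matrice1 : List (List Int)) (matrice2 : List (List Int)) (n : Int) : Decidable (Pre_comparare matrice1 matrice2 n) := by unfold Pre_comparare pvGood pvCol; infer_instance

def pvWitness_comparare : List (List Int) × List (List Int) × Int := ([[1, 2, 3]], [[4, 5, 6]], 1)

def Spec_comparare (matrice1 : List (List Int)) (matrice2 : List (List Int)) (n : Int) (out : Int) : Prop := out = comparare_alt matrice1 matrice2 n
instance (matrice1 : List (List Int)) (matrice2 : List (List Int)) (n : Int) (out : Int) : Decidable (Spec_comparare matrice1 matrice2 n out) := by unfold Spec_comparare; infer_instance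

-- ===== CLAIM (what is proved, stated in full; the proofs are below) =====
def Claim_equal_comparare : Prop := ∀ (matrice1 : List (List Int)) (matrice2 : List (List Int)) (n : Int), Dom_comparare matrice1 matrice2 n → Pre_comparare matrice1 matrice2 n → Spec_comparare matrice1 matrice2 n (comparare matrice1 matrice2 n)

-- ===== LEMMAS AND PROOFS =====

-- reference walk for B: first differing third column of the zipped prefixes
def pvZip : List (List Int) → List (List Int) → Int
  | a :: as, b :: bs =>
      if a[2]?.getD 0 ≠ b[2]?.getD 0 then (if a[2]?.getD 0 < b[2]?.getD 0 then -1 else 1)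
      else pvZip as bs
  | _, _ => 0

-- Pre_ specialised to the Nat iteration count
def pvPreK (m1 m2 : List (List Int)) (k : Nat) : Prop :=
  (∃ j < k, (∀ i < j, pvGood m1 m2 i ∧ pvCol m1 i = pvCol m2 i) ∧
     pvGood m1 m2 j ∧ pvCol m1 j ≠ pvCol m2 j)
  ∨ (∀ j < k, pvGood m1 m2 j)

theorem pvGetD_succ_tail (m : List (List Int)) (j : Nat) :
    m.getD (j+1) [] = m.tail.getD j [] := by
  cases m <;> simp

theorem pvCol_succ (m : List (List Int)) (j : Nat) : pvCol m (j+1) = pvCol m.tail j := by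
  unfold pvCol; rw [pvGetD_succ_tail]

theorem pvGood_succ (m1 m2 : List (List Int)) (j : Nat) :
    pvGood m1 m2 (j+1) ↔ pvGood m1.tail m2.tail j := by
  unfold pvGood; rw [pvGetD_succ_tail, pvGetD_succ_tail]

theorem pvInner_shift (m1 m2 : List (List Int)) (fuel : Nat) :
    ∀ j, pvInner m1 m2 (j+1) fuel = pvInner m1.tail m2.tail j fuel := by
  induction fuel with
  | zero => intro j; rfl
  | succ f ih =>
      intro j
      simp only [pvInner, pvCol_succ, ih (j+1)]

theorem pvOuter_none (m1 m2 : List (List Int)) (k : Nat)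
    (h : pvInner m1 m2 0 k = none) : ∀ f, pvOuter m1 m2 k f = none := by
  intro f
  induction f with
  | zero => rfl
  | succ f ih => simp [pvOuter, h, ih]

theorem pvOuter_succ (m1 m2 : List (List Int)) (k : Nat) :
    ∀ f, pvOuter m1 m2 k (f+1) = pvInner m1 m2 0 k := by
  intro f
  cases h : pvInner m1 m2 0 k with
  | some v => simp [pvOuter, h]
  | none => exact h ▸ pvOuter_none m1 m2 k h (f+1)

theorem pvComparare_eq_inner (m1 m2 : List (List Int)) (n : Int) :
    comparare m1 m2 n = (pvInner m1 m2 0 n.toNat).getD 0 := by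
  unfold comparare
  cases h : n.toNat with
  | zero => simp [pvOuter, pvInner]
  | succ t => rw [pvOuter_succ]

theorem pvCol2B_getElem (r : List Int) : pvCol2B r = r[2]?.getD 0 := by
  rw [pvCol2B, PySem.List.pyGetD_ofNat', List.getD_eq_getElem?_getD]

theorem pvCol_zero_cons (a : List Int) (as : List (List Int)) :
    pvCol (a :: as) 0 = a[2]?.getD 0 := by
  unfold pvCol; simp [List.getD_eq_getElem?_getD]

theorem pv_find_zip (xs ys : List (List Int)) :
    (match (xs.zip ys).find? (fun p => pvCol2B p.1 != pvCol2B p.2) with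
     | some p => if pvCol2B p.1 < pvCol2B p.2 then (-1 : Int) else 1
     | none => 0) = pvZip xs ys := by
  induction xs generalizing ys with
  | nil => cases ys <;> simp [pvZip]
  | cons a as ih =>
      cases ys with
      | nil => simp [pvZip]
      | cons b bs =>
        simp only [List.zip_cons_cons, List.find?_cons, pvCol2B_getElem]
        by_cases h : (a[2]?.getD 0 : Int) = b[2]?.getD 0
        · have hb : (a[2]?.getD 0 != b[2]?.getD 0) = false := by simp [h]
          have := ih bs
          simp only [pvCol2B_getElem] at this
          simpa [hb, pvZip, h] using this
        · have hb : (a[2]?.getD 0 != b[2]?.getD 0) = true := by simpa using h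
          simp [hb, pvZip, h]

theorem pv_main (k : Nat) :
    ∀ (m1 m2 : List (List Int)), pvPreK m1 m2 k →
      (pvInner m1 m2 0 k).getD 0 = pvZip (m1.take k) (m2.take k) := by
  induction k with
  | zero => intro m1 m2 _; simp [pvInner, pvZip]
  | succ k ih =>
      intro m1 m2 hpre
      have hg0 : pvGood m1 m2 0 := by
        rcases hpre with ⟨j, hj, hpref, hgood, hne⟩ | h
        · rcases Nat.eq_zero_or_pos j with rfl | hpos
          · exact hgood
          · exact (hpref 0 hpos).1
        · exact h 0 (Nat.succ_pos k)
      cases m1 with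
      | nil => exact absurd hg0.1 (by simp [pvGood])
      | cons a as =>
        cases m2 with
        | nil => exact absurd hg0.2 (by simp [pvGood])
        | cons b bs =>
          have hca : pvCol (a :: as) 0 = a[2]?.getD 0 := pvCol_zero_cons a as
          have hcb : pvCol (b :: bs) 0 = b[2]?.getD 0 := pvCol_zero_cons b bs
          have hshift : pvInner (a :: as) (b :: bs) 1 k = pvInner as bs 0 k :=
            pvInner_shift (a :: as) (b :: bs) k 0
          simp only [pvInner, hca, hcb, List.take_succ_cons, pvZip, gt_iff_lt, hshift]
          rcases lt_trichotomy (a[2]?.getD 0 : Int) (b[2]?.getD 0) with h | h | h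
          · simp [h, ne_of_lt h, not_lt.mpr h.le]
          · have hpre' : pvPreK as bs k := by
              rcases hpre with ⟨j, hj, hpref, hgood, hne⟩ | hall
              · cases j with
                | zero => exact absurd (by rw [hca, hcb]; exact h) hne
                | succ i =>
                    left
                    refine ⟨i, by omega, ?_, ?_, ?_⟩
                    · intro i' hi'
                      have hp := hpref (i'+1) (by omega)
                      exact ⟨(pvGood_succ _ _ i').mp hp.1, by
                        have := hp.2; rwa [pvCol_succ, pvCol_succ] at this⟩
                    · exact (pvGood_succ _ _ i).mp hgood
                    · rwa [pvCol_succ, pvCol_succ] at hne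
              · right
                intro j hj
                exact (pvGood_succ _ _ j).mp (hall (j+1) (by omega))
            simp [h, lt_irrefl, ih as bs hpre']
          · simp [h, not_lt.mpr h.le, h.ne']

theorem pvAlt_eq_zip (m1 m2 : List (List Int)) (n : Int) :
    comparare_alt m1 m2 n = pvZip (m1.take n.toNat) (m2.take n.toNat) := by
  have hmax : max n 0 = ((n.toNat : Nat) : Int) := by omega
  simp only [comparare_alt, hmax, PySem.List.slice_to_natCast]
  exact pv_find_zip _ _

-- ===== VERDICT (by name: the statement is the Claim_ definition above) =====
theorem comparare_spec : Claim_equal_comparare := by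
  intro m1 m2 n _hdom hpre
  show comparare m1 m2 n = comparare_alt m1 m2 n
  rw [pvComparare_eq_inner, pvAlt_eq_zip]
  apply pv_main
  rcases hpre with hn | ⟨j, hj, hjn, hpref, hgood, hne⟩ | ⟨h1, h2, hall⟩
  · right; intro j hj; omega
  · left; exact ⟨j, by omega, hpref, hgood, hne⟩
  · right; exact hall
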